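-- pv_equiv track=rewrite | github.com/micchyboy237/jet_python_modules | jet/code/markdown_utils.py | process_separator_lines
-- ===== SOURCE A (Python) =====
-- from typing import List, Dict, Any, Optional, Union, TypedDict
--
-- def process_separator_lines(md_content: str) -> str:
--     """
--     Process markdown content to handle lines with only '-' or '*', moving next line's text to the right
--     with a single space, or removing the separator if no text follows.
--
--     Args:
--         md_content: Raw markdown content as a string.
--
--     Returns:
--         Processed markdown content with transformed separator lines.
--     """
--     lines = md_content.splitlines()
--     result: List[str] = []
--     i = 0
--
--     while i < len(lines):
--         current_line = lines[i].strip()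
--         if current_line in ("-", "*"):
--             # Check if there's a next line
--             if i + 1 < len(lines):
--                 next_line = lines[i + 1].strip()
--                 if next_line:
--                     # Combine separator and next line text
--                     result.append(f"{current_line} {next_line}")
--                     i += 2  # Skip the next line
--                 else:
--                     # No text in next line, skip the separator
--                     i += 1
--             else:
--                 # Separator is the last line, skip it
--                 i += 1
--         else:
--             # Preserve non-separator lines
--             result.append(lines[i])
--             i += 1
--
--     # Join lines, preserving original line endings
--     return "\n".join(result)
-- ===== SOURCE B (Python) =====
-- def process_separator_lines(md_content: str) -> str:
--     """Single forward pass carrying a pending separator awaiting a merge."""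
--     result = []
--     pending = None
--     for line in md_content.splitlines():
--         s = line.strip()
--         if pending is not None:
--             p, pending = pending, None
--             if s:
--                 result.append(f"{p} {s}")
--                 continue
--             # empty follower: separator dropped, fall through to normal handling
--         if s in ("-", "*"):
--             pending = s
--         else:
--             result.append(line)
--     return "\n".join(result)
-- ===== Notes on version B (the rewrite author's own statement) =====
-- stated objective: simpler
-- what changed: Replaced the index-based while loop with variable step (i += 1 or 2) by a single for-loop over the lines carrying a pending-separator state variable that is merged with the next non-empty line, dropped on an empty follower, and discarded if left over at the end.
import Mathlib
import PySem

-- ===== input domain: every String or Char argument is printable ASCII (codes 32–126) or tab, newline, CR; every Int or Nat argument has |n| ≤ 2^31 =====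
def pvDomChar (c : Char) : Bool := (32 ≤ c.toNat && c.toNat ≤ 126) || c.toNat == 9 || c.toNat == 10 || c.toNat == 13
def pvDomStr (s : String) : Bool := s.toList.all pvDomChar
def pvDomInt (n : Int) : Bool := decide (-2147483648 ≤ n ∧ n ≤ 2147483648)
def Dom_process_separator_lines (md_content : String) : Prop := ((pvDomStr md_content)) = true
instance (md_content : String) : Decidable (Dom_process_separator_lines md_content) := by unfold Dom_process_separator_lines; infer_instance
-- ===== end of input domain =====

-- B changes the decomposition: a single forward pass with a 'pending' separator state
-- instead of A's index loop with variable step; return values proved equal on all inputs.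

-- ===== PORT A =====
-- A's while loop over indices, stepping by 1 or 2, as structural recursion on the line list.
def pvGoA : List String → List String
  | [] => []
  | l :: rest =>
    let cur := PySem.Str.strip l
    if cur = "-" ∨ cur = "*" then
      match rest with
      | [] => []                                   -- separator is the last line: skip it
      | next :: rest' =>
        let nl := PySem.Str.strip next
        if nl ≠ "" then (cur ++ " " ++ nl) :: pvGoA rest'   -- merge, skip next (i += 2)
        else pvGoA (next :: rest')                 -- empty follower: skip the separator only
    else l :: pvGoA rest

def process_separator_lines (md_content : String) : String :=
  PySem.Str.join "\n" (pvGoA (PySem.Str.splitlines md_content))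

-- ===== PORT B =====
-- one fold step: consume a pending separator if any (merge or fall through), else normal handling.
def pvStepB (st : List String × Option String) (line : String) : List String × Option String :=
  let s := PySem.Str.strip line
  let normal : List String × Option String :=
    if s = "-" ∨ s = "*" then (st.1, some s) else (st.1 ++ [line], none)
  match st.2 with
  | some p => if s ≠ "" then (st.1 ++ [p ++ " " ++ s], none) else normal
  | none => normal

def process_separator_lines_alt (md_content : String) : String :=
  PySem.Str.join "\n" (((PySem.Str.splitlines md_content).foldl pvStepB ([], none)).1)

-- ===== PRECONDITION & SPEC =====
def Spec_process_separator_lines (md_content : String) (out : String) : Prop := out = process_separator_lines_alt md_content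
instance (md_content : String) (out : String) : Decidable (Spec_process_separator_lines md_content out) := by unfold Spec_process_separator_lines; infer_instance

-- ===== CLAIM (what is proved, stated in full; the proofs are below) =====
def Claim_equal_process_separator_lines : Prop := ∀ (md_content : String), Dom_process_separator_lines md_content → Spec_process_separator_lines md_content (process_separator_lines md_content)

-- ===== LEMMAS AND PROOFS =====

-- A's behaviour continuing after a separator line whose strip is p (the 'pending' state).
def pvGoPend (p : String) : List String → List String
  | [] => []
  | next :: rest' =>
    let nl := PySem.Str.strip next
    if nl ≠ "" then (p ++ " " ++ nl) :: pvGoA rest'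
    else pvGoA (next :: rest')

-- the joint invariant: fold state (res, pending) yields res ++ the A-side continuation
def pvG : Option String → List String → List String
  | none, lines => pvGoA lines
  | some p, lines => pvGoPend p lines

theorem pvGoA_cons (l : String) (rest : List String) :
    pvGoA (l :: rest) = if PySem.Str.strip l = "-" ∨ PySem.Str.strip l = "*"
      then pvGoPend (PySem.Str.strip l) rest else l :: pvGoA rest := by
  cases rest <;> simp [pvGoA, pvGoPend]

theorem pvGoPend_cons (p l : String) (rest : List String) :
    pvGoPend p (l :: rest) = if PySem.Str.strip l ≠ ""
      then (p ++ " " ++ PySem.Str.strip l) :: pvGoA rest else pvGoA (l :: rest) := by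
  simp [pvGoPend]

theorem pvFold_inv (lines : List String) : ∀ (pending : Option String) (res : List String),
    (lines.foldl pvStepB (res, pending)).1 = res ++ pvG pending lines := by
  induction lines with
  | nil => intro pending res; cases pending <;> simp [pvG, pvGoA, pvGoPend]
  | cons l rest ih =>
    intro pending res
    rw [List.foldl_cons]
    cases pending with
    | none =>
      by_cases h : PySem.Str.strip l = "-" ∨ PySem.Str.strip l = "*"
      · have : pvStepB (res, none) l = (res, some (PySem.Str.strip l)) := by
          simp [pvStepB, h]
        rw [this, ih, pvG, pvG, pvGoA_cons, if_pos h]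
      · have : pvStepB (res, none) l = (res ++ [l], none) := by
          simp [pvStepB, h]
        rw [this, ih, pvG, pvG, pvGoA_cons, if_neg h]
        simp
    | some p =>
      by_cases hs : PySem.Str.strip l = ""
      · have hnot : ¬ (PySem.Str.strip l = "-" ∨ PySem.Str.strip l = "*") := by
          rw [hs]; rintro (h | h) <;> simp_all
        have : pvStepB (res, some p) l = (res ++ [l], none) := by
          simp [pvStepB, hs]
        rw [this, ih, pvG, pvG, pvGoPend_cons, if_neg (by simp [hs]), pvGoA_cons,
          if_neg hnot]
        simp
      · have : pvStepB (res, some p) l = (res ++ [p ++ " " ++ PySem.Str.strip l], none) := by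
          simp [pvStepB, hs]
        rw [this, ih, pvG, pvG, pvGoPend_cons, if_pos hs]
        simp

-- ===== VERDICT (by name: the statement is the Claim_ definition above) =====
theorem process_separator_lines_spec : Claim_equal_process_separator_lines := by
  intro md _
  unfold Spec_process_separator_lines process_separator_lines process_separator_lines_alt
  rw [pvFold_inv _ none []]
  rfl
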